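-- pv_equiv track=rewrite | github.com/caishamble/aethra | cse_course_file/CSE231/week14/pythonProject1/question2.py | calculate_total_sales
-- ===== SOURCE A (Python) =====
-- def calculate_total_sales(sales_dict):
--     new_dict = {}
--     for key_sales, value_sales in sales_dict.items():
--         for key_value_sales, value_value_sales in value_sales.items():
--             if key_value_sales not in new_dict.keys():
--                 sum_value = sum(value_value_sales)
--                 new_dict[key_value_sales] = sum_value
--
--             elif key_value_sales in new_dict.keys():
--                 sum_value = sum(value_value_sales)
--                 new_dict[key_value_sales] += sum_value
--     return new_dict
-- ===== SOURCE B (Python) =====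
-- def calculate_total_sales(sales_dict):
--     keys = []
--     for inner in sales_dict.values():
--         for k in inner:
--             if k not in keys:
--                 keys.append(k)
--     return {k: sum(x for inner in sales_dict.values()
--                      for kk, lst in inner.items() if kk == k
--                      for x in lst)
--             for k in keys}
-- ===== Notes on version B (the rewrite author's own statement) =====
-- stated objective: alternative
-- what changed: B abandons the running-total dict entirely: it first collects the distinct inner keys in first-occurrence order, then computes each key's total by re-scanning the whole nested structure and summing all matching values, trading A's single fused pass for per-key full scans.
import Mathlib
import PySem

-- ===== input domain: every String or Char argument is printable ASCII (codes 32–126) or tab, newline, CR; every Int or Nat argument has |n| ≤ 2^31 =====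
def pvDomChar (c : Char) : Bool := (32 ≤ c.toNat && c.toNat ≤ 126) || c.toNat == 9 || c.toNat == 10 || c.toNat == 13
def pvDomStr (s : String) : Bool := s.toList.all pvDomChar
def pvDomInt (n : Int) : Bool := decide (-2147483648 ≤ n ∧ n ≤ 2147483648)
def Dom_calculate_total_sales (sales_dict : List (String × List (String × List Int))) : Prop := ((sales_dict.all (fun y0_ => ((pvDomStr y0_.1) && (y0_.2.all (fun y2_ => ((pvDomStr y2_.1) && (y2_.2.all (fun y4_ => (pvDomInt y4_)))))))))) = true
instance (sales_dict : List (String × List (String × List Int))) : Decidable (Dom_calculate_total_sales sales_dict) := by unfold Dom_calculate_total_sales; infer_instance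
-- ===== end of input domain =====

-- B drops A's running-total dict: it first collects the distinct inner keys in
-- first-occurrence order, then computes each key's total by re-scanning the whole
-- structure (alternative algorithm, not claimed faster); return values are equal.

-- ===== PORT A =====
-- sum(xs) on ints (Python's sum loop)
def pvSum : List Int → Int
  | [] => 0
  | x :: xs => x + pvSum xs

-- A's inner loop: new_dict[k] = sum(l) on first sight, new_dict[k] += sum(l) afterwards
def pvAInner (new_dict : PySem.Dict String Int) :
    List (String × List Int) → PySem.Dict String Int
  | [] => new_dict
  | p :: ps =>
    pvAInner
      (if new_dict.contains p.1 = false then new_dict.insert p.1 (pvSum p.2)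
       else new_dict.insert p.1 (new_dict.getD p.1 0 + pvSum p.2)) ps

-- A's outer loop over sales_dict.items()
def pvAOuter (new_dict : PySem.Dict String Int) :
    List (String × List (String × List Int)) → PySem.Dict String Int
  | [] => new_dict
  | kv :: rest => pvAOuter (pvAInner new_dict kv.2) rest

def calculate_total_sales (sales_dict : List (String × List (String × List Int))) : List (String × Int) :=
  (pvAOuter PySem.Dict.empty sales_dict).items

-- ===== PORT B =====
-- B's key-collecting loops: 'if k not in keys: keys.append(k)' is PySem.Set.add
def pvKeyInner (keys : PySem.Set String) :
    List (String × List Int) → PySem.Set String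
  | [] => keys
  | p :: ps => pvKeyInner (PySem.Set.add keys p.1) ps

def pvKeyOuter (keys : PySem.Set String) :
    List (String × List (String × List Int)) → PySem.Set String
  | [] => keys
  | kv :: rest => pvKeyOuter (pvKeyInner keys kv.2) rest

-- B's generator: sum(x for inner in values for (kk, lst) in inner.items() if kk == k for x in lst)
def pvTotal (sales_dict : List (String × List (String × List Int))) (k : String) : Int :=
  pvSum (sales_dict.flatMap
    (fun kv => ((kv.2.filter (fun p => p.1 == k)).flatMap (fun p => p.2))))

-- B's dict comprehension over the distinct keys (distinct keys ⇒ the dict is this pair list)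
def calculate_total_sales_alt (sales_dict : List (String × List (String × List Int))) : List (String × Int) :=
  (pvKeyOuter PySem.Set.empty sales_dict).map (fun k => (k, pvTotal sales_dict k))

-- ===== PRECONDITION & SPEC =====
def Spec_calculate_total_sales (sales_dict : List (String × List (String × List Int))) (out : List (String × Int)) : Prop := out = calculate_total_sales_alt sales_dict
instance (sales_dict : List (String × List (String × List Int))) (out : List (String × Int)) : Decidable (Spec_calculate_total_sales sales_dict out) := by unfold Spec_calculate_total_sales; infer_instance

-- ===== CLAIM (what is proved, stated in full; the proofs are below) =====
def Claim_equal_calculate_total_sales : Prop := ∀ (sales_dict : List (String × List (String × List Int))), Dom_calculate_total_sales sales_dict → Spec_calculate_total_sales sales_dict (calculate_total_sales sales_dict)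

-- ===== LEMMAS AND PROOFS =====

-- A's fused update, written as a single insert (the two branches store the same value
-- when the key is fresh, since then getD gives the default 0 is irrelevant: first branch)
def pvStep (d : PySem.Dict String Int) (p : String × List Int) : PySem.Dict String Int :=
  d.insert p.1 (if d.contains p.1 = false then pvSum p.2 else d.getD p.1 0 + pvSum p.2)

theorem pvAInner_eq_foldl (ps : List (String × List Int)) (d : PySem.Dict String Int) :
    pvAInner d ps = ps.foldl pvStep d := by
  induction ps generalizing d with
  | nil => rfl
  | cons p ps ih =>
    simp only [pvAInner, List.foldl_cons, ih, pvStep]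
    split_ifs <;> rfl

theorem pvAOuter_eq_foldl (sd : List (String × List (String × List Int)))
    (d : PySem.Dict String Int) :
    pvAOuter d sd = (sd.flatMap (fun kv => kv.2)).foldl pvStep d := by
  induction sd generalizing d with
  | nil => rfl
  | cons kv rest ih =>
    simp only [pvAOuter, List.flatMap_cons, List.foldl_append, ih, pvAInner_eq_foldl]

-- the total of key k over a flat pair list
def pvTotalOf (xs : List (String × List Int)) (k : String) : Int :=
  pvSum ((xs.filter (fun p => p.1 == k)).flatMap (fun p => p.2))

theorem pvSum_append (a b : List Int) : pvSum (a ++ b) = pvSum a + pvSum b := by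
  induction a with
  | nil => simp [pvSum]
  | cons x xs ih => simp [pvSum, ih]; ring

theorem pvTotal_eq (sd : List (String × List (String × List Int))) (k : String) :
    pvTotal sd k = pvTotalOf (sd.flatMap (fun kv => kv.2)) k := by
  induction sd with
  | nil => rfl
  | cons kv rest ih =>
    simp only [pvTotal, pvTotalOf, List.flatMap_cons, List.filter_append,
      List.flatMap_append, pvSum_append] at ih ⊢
    rw [ih]

-- keys of A's fold = first-occurrence distinct keys
theorem pvFold_keys (xs : List (String × List Int)) (d : PySem.Dict String Int) :
    (xs.foldl pvStep d).keys = PySem.Set.update d.keys (xs.map (fun p => p.1)) := by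
  exact PySem.Dict.keys_foldl_insert_key (key := fun p : String × List Int => p.1)
    (f := fun d p => if d.contains p.1 = false then pvSum p.2 else d.getD p.1 0 + pvSum p.2)
    (l := xs) (d := d)

theorem pvFold_nodup (xs : List (String × List Int)) :
    (xs.foldl pvStep PySem.Dict.empty).keys.Nodup := by
  exact PySem.Dict.nodup_keys_foldl_insert_key xs (fun p : String × List Int => p.1)
    (fun d p => if d.contains p.1 = false then pvSum p.2 else d.getD p.1 0 + pvSum p.2)
    PySem.Dict.empty PySem.Dict.nodup_keys_empty

-- each stored value is the initial value plus the sum of all matching list sums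
theorem pvFold_getD (xs : List (String × List Int)) (d : PySem.Dict String Int) (k : String) :
    (xs.foldl pvStep d).getD k 0 = d.getD k 0 + pvTotalOf xs k := by
  induction xs generalizing d with
  | nil => simp [pvTotalOf, List.filter_nil, pvSum]
  | cons p ps ih =>
    rw [List.foldl_cons, ih]
    have hstep : (pvStep d p).getD k 0 = if k = p.1 then d.getD p.1 0 + pvSum p.2 else d.getD k 0 := by
      rw [pvStep, PySem.Dict.getD_insert]
      split_ifs with h hc
      · subst h
        rw [PySem.Dict.getD_of_not_contains _ _ (by simpa using hc)]
        ring
      · rfl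
      · rfl
    rw [hstep]
    unfold pvTotalOf
    by_cases hk : k = p.1
    · subst hk
      simp only [List.filter_cons, beq_self_eq_true, if_true, List.flatMap_cons, pvSum_append]
      ring
    · have : (p.1 == k) = false := by simpa using fun h => hk h.symm
      simp only [List.filter_cons, this, hk, Bool.false_eq_true, ite_false]

-- B's key loops compute Set.update over the flattened key list
theorem pvKeyInner_eq (ps : List (String × List Int)) (keys : PySem.Set String) :
    pvKeyInner keys ps = PySem.Set.update keys (ps.map (fun p => p.1)) := by
  induction ps generalizing keys with
  | nil => rfl
  | cons p ps ih => simp only [pvKeyInner, List.map_cons, PySem.Set.update_cons, ih]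

theorem pvKeyOuter_eq (sd : List (String × List (String × List Int)))
    (keys : PySem.Set String) :
    pvKeyOuter keys sd = PySem.Set.update keys ((sd.flatMap (fun kv => kv.2)).map (fun p => p.1)) := by
  induction sd generalizing keys with
  | nil => rfl
  | cons kv rest ih =>
    simp only [pvKeyOuter, pvKeyInner_eq, List.flatMap_cons, List.map_append,
      PySem.Set.update_append, ih]

-- ===== VERDICT (by name: the statement is the Claim_ definition above) =====
theorem calculate_total_sales_spec : Claim_equal_calculate_total_sales := by
  intro sd _
  unfold Spec_calculate_total_sales calculate_total_sales calculate_total_sales_alt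
  set xs := sd.flatMap (fun kv => kv.2) with hxs
  rw [pvAOuter_eq_foldl]
  rw [PySem.Dict.items_eq_map_keys _ (pvFold_nodup xs) 0]
  rw [pvFold_keys, pvKeyOuter_eq]
  apply List.map_congr_left
  intro k _
  rw [pvFold_getD, PySem.Dict.getD_empty, pvTotal_eq]
  ring_nf
  rfl
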